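-- pv_equiv track=rewrite | github.com/YaswanthPalepu/Tech_Demo_Project_POC | src/auto_fixer/embedding_context_extractor.py | _combine_contexts
-- ===== SOURCE A (Python) =====
-- from typing import Dict, List, Optional
--
-- def _combine_contexts(
--
--     ast_context: Dict[str, str],
--     embedding_context: Dict[str, str]
-- ) -> Dict[str, str]:
--     """
--     Intelligently combine AST and embedding contexts.
--
--     Strategy:
--     - Merge functions from both AST and embeddings for the same file
--     - Remove duplicate functions (by name)
--     - Prefer AST version when duplicate (more precise)
--     - Add embedding results for new functions/files
--
--     Args:
--         ast_context: Context from AST extraction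
--         embedding_context: Context from embedding search
--
--     Returns:
--         Combined context dict
--     """
--     combined = {}
--
--     # Track which functions we've seen (to avoid duplicates)
--     seen_functions = {}  # {file_path: {function_name, ...}}
--
--     # Helper to parse function names from code string
--     def extract_function_names(code_string: str) -> set:
--         """Extract function/class names from formatted code string."""
--         names = set()
--         for line in code_string.split('\n'):
--             if line.startswith('# function:') or line.startswith('# class:') or line.startswith('# http_endpoint:'):
--                 # Parse "# function: my_func (line 123)"
--                 parts = line.split(':')
--                 if len(parts) >= 2:
--                     name_part = parts[1].strip()
--                     # Remove "(line X)" suffix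
--                     if '(' in name_part:
--                         name_part = name_part.split('(')[0].strip()
--                     names.add(name_part)
--         return names
--
--     # Step 1: Add all AST results (more precise)
--     for file_path, code in ast_context.items():
--         combined[file_path] = code
--         seen_functions[file_path] = extract_function_names(code)
--
--     # Step 2: Merge embedding results
--     for file_path, embed_code in embedding_context.items():
--         embed_funcs = extract_function_names(embed_code)
--
--         if file_path not in combined:
--             # New file from embeddings - add it
--             combined[file_path] = embed_code
--             seen_functions[file_path] = embed_funcs
--         else:
--             # File exists in AST results - merge new functions only
--             existing_funcs = seen_functions[file_path]
--             new_funcs = embed_funcs - existing_funcs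
--
--             if new_funcs:
--                 # Extract only new functions from embedding code
--                 new_code_parts = []
--                 lines = embed_code.split('\n')
--                 in_function = False
--                 current_func_name = None
--                 current_func_lines = []
--
--                 for line in lines:
--                     if line.startswith('# function:') or line.startswith('# class:') or line.startswith('# http_endpoint:'):
--                         # Save previous function if it was new
--                         if in_function and current_func_name in new_funcs:
--                             new_code_parts.extend(current_func_lines)
--                             new_code_parts.append("")
--
--                         # Start new function
--                         parts = line.split(':')
--                         if len(parts) >= 2:
--                             name_part = parts[1].strip()
--                             if '(' in name_part:
--                                 name_part = name_part.split('(')[0].strip()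
--                             current_func_name = name_part
--                             current_func_lines = [line]
--                             in_function = True
--                     elif in_function:
--                         current_func_lines.append(line)
--
--                 # Don't forget last function
--                 if in_function and current_func_name in new_funcs:
--                     new_code_parts.extend(current_func_lines)
--                     new_code_parts.append("")
--
--                 # Append new functions to existing file
--                 if new_code_parts:
--                     combined[file_path] = combined[file_path].rstrip() + "\n\n" + '\n'.join(new_code_parts)
--                     seen_functions[file_path].update(new_funcs)
--
--     return combined
-- ===== SOURCE B (Python) =====
-- def _segments(code_string):
--     """Split a formatted code string into ordered (name, block_lines) segments.
--
--     A new segment starts at each '# function:'/'# class:'/'# http_endpoint:'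
--     header line; other lines are appended to the current segment; lines before
--     the first header are discarded."""
--     segs = []
--     for line in code_string.split('\n'):
--         if line.startswith('# function:') or line.startswith('# class:') or line.startswith('# http_endpoint:'):
--             name = line.split(':')[1].strip()
--             if '(' in name:
--                 name = name.split('(')[0].strip()
--             segs.append((name, [line]))
--         elif segs:
--             segs[-1][1].append(line)
--     return segs
--
--
-- def _combine_contexts(ast_context, embedding_context):
--     combined = dict(ast_context)
--     seen_functions = {fp: {name for name, _ in _segments(code)}
--                       for fp, code in ast_context.items()}
--
--     for file_path, embed_code in embedding_context.items():
--         segs = _segments(embed_code)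
--         embed_funcs = {name for name, _ in segs}
--
--         if file_path not in combined:
--             combined[file_path] = embed_code
--             seen_functions[file_path] = embed_funcs
--         else:
--             new_funcs = embed_funcs - seen_functions[file_path]
--             parts = [l for name, block in segs if name in new_funcs
--                        for l in block + [""]]
--             if parts:
--                 combined[file_path] = combined[file_path].rstrip() + "\n\n" + '\n'.join(parts)
--                 seen_functions[file_path].update(new_funcs)
--     return combined
-- ===== Notes on version B (the rewrite author's own statement) =====
-- stated objective: simpler
-- what changed: B replaces A's duplicated name-parsing plus flag-driven re-scan of the embedding code by a single helper that splits the code once into ordered (name, block_lines) segments, from which both the name set and the new-function blocks are read off.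
import Mathlib
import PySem

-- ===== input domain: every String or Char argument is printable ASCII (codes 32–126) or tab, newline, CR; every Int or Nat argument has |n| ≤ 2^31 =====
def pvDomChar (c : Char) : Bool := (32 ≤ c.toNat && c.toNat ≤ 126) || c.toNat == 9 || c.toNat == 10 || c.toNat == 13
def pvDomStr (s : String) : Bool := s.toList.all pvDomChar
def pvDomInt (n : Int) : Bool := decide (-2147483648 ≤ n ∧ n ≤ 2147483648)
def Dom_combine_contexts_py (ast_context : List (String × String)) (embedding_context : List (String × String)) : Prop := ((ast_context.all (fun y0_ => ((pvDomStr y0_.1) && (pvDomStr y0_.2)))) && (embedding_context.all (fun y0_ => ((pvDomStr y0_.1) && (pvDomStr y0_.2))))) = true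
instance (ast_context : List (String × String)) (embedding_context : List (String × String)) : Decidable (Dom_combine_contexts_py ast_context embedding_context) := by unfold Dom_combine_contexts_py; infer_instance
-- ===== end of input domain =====

-- B replaces A's duplicated name-parsing and flag-driven re-scan of the embedding code by one
-- block splitter producing (name, block_lines) segments, used both for the name set and for the
-- extraction of new blocks (objective: simpler; same return value).

-- ===== PORT A =====
-- line.startswith('# function:') or line.startswith('# class:') or line.startswith('# http_endpoint:')
def pvHdrA (line : List Char) : Bool :=
  PySem.Chars.startswith line "# function:".toList ||
  PySem.Chars.startswith line "# class:".toList ||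
  PySem.Chars.startswith line "# http_endpoint:".toList

-- name_part = parts[1].strip(); if '(' in name_part: name_part = name_part.split('(')[0].strip()
-- (parts[1] only reached under the len(parts) >= 2 guard, hence getD; split('(')[0] of a
-- nonempty split result, hence headD)
def pvParseA (parts : List (List Char)) : List Char :=
  let np := PySem.Chars.strip (parts.getD 1 [])
  if PySem.Chars.isIn ['('] np then PySem.Chars.strip ((PySem.Chars.splitOn np ['(']).headD []) else np

-- extract_function_names: loop over code.split('\n'), names.add(parsed name) at each header
def pvExStepA (names : PySem.Set (List Char)) (line : List Char) : PySem.Set (List Char) :=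
  if pvHdrA line then
    let parts := PySem.Chars.splitOn line [':']
    if 2 ≤ parts.length then PySem.Set.add names (pvParseA parts) else names
  else names

def pvExtractA (code : List Char) : PySem.Set (List Char) :=
  (PySem.Chars.splitOn code ['\n']).foldl pvExStepA PySem.Set.empty

-- 'current_func_name in new_funcs' (None before any header, only tested behind in_function)
def pvInNew (nf : PySem.Set (List Char)) (cfn : Option (List Char)) : Bool :=
  match cfn with
  | some n => PySem.Set.contains nf n
  | none => false

-- the flush A performs at each header and after the loop:
-- if in_function and current_func_name in new_funcs: new_code_parts.extend(current_func_lines); append("")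
def pvFlush (nf : PySem.Set (List Char))
    (s : List (List Char) × Bool × Option (List Char) × List (List Char)) : List (List Char) :=
  if s.2.1 && pvInNew nf s.2.2.1 then s.1 ++ s.2.2.2 ++ [[]] else s.1

-- one iteration of A's scan; state = (new_code_parts, in_function, current_func_name, current_func_lines)
def pvStepA (nf : PySem.Set (List Char))
    (s : List (List Char) × Bool × Option (List Char) × List (List Char)) (line : List Char) :
    List (List Char) × Bool × Option (List Char) × List (List Char) :=
  if pvHdrA line then
    let ncp := pvFlush nf s
    let parts := PySem.Chars.splitOn line [':']
    if 2 ≤ parts.length then (ncp, true, some (pvParseA parts), [line])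
    else (ncp, s.2.1, s.2.2.1, s.2.2.2)
  else if s.2.1 then (s.1, s.2.1, s.2.2.1, s.2.2.2 ++ [line]) else s

-- the whole scan producing new_code_parts (final 'don't forget last function' flush included)
def pvNewPartsA (nf : PySem.Set (List Char)) (code : List Char) : List (List Char) :=
  pvFlush nf ((PySem.Chars.splitOn code ['\n']).foldl (pvStepA nf) ([], false, none, []))

-- step 2 body of A for one (file_path, embed_code) item; state = (combined, seen_functions)
def pvStep2A (st : PySem.Dict String String × PySem.Dict String (PySem.Set (List Char)))
    (p : String × String) : PySem.Dict String String × PySem.Dict String (PySem.Set (List Char)) :=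
  let ef := pvExtractA p.2.toList
  if st.1.contains p.1 = false then (st.1.insert p.1 p.2, st.2.insert p.1 ef)
  else
    let ex := st.2.getD p.1 PySem.Set.empty
    let nf := PySem.Set.diff ef ex
    if nf.isEmpty then st
    else
      let ncp := pvNewPartsA nf p.2.toList
      if ncp.isEmpty then st
      else
        (st.1.insert p.1 (String.ofList (PySem.Chars.rstrip (st.1.getD p.1 "").toList ++
           "\n\n".toList ++ PySem.Chars.join ['\n'] ncp)),
         st.2.insert p.1 (PySem.Set.update ex nf))

def combine_contexts_py (ast_context : List (String × String)) (embedding_context : List (String × String)) : List (String × String) :=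
  ((embedding_context.foldl pvStep2A
      (ast_context.foldl
        (fun st p => (st.1.insert p.1 p.2, st.2.insert p.1 (pvExtractA p.2.toList)))
        (PySem.Dict.empty, PySem.Dict.empty))).1).items

-- ===== PORT B =====
-- same three header prefixes
def pvHdrB (line : List Char) : Bool :=
  PySem.Chars.startswith line "# function:".toList ||
  PySem.Chars.startswith line "# class:".toList ||
  PySem.Chars.startswith line "# http_endpoint:".toList

-- name = line.split(':')[1].strip(); if '(' in name: name = name.split('(')[0].strip()
-- ([1] always exists on a header line, hence getD; split('(')[0] nonempty, hence headD)
def pvParseB (line : List Char) : List Char :=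
  let np := PySem.Chars.strip ((PySem.Chars.splitOn line [':']).getD 1 [])
  if PySem.Chars.isIn ['('] np then PySem.Chars.strip ((PySem.Chars.splitOn np ['(']).headD []) else np

-- _segments: start a new (name, [line]) segment at each header, append other lines to the last
-- segment (segs[-1][1].append(line)), drop lines before the first header
def pvSegStepB (segs : List (List Char × List (List Char))) (line : List Char) :
    List (List Char × List (List Char)) :=
  if pvHdrB line then segs ++ [(pvParseB line, [line])]
  else
    match segs.getLast? with
    | none => segs
    | some pr => segs.dropLast ++ [(pr.1, pr.2 ++ [line])]

def pvSegmentsB (code : List Char) : List (List Char × List (List Char)) :=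
  (PySem.Chars.splitOn code ['\n']).foldl pvSegStepB []

-- [l for name, block in segs if name in new_funcs for l in block + [""]]
def pvPartsB (nf : PySem.Set (List Char)) (segs : List (List Char × List (List Char))) :
    List (List Char) :=
  segs.flatMap (fun s => if PySem.Set.contains nf s.1 then s.2 ++ [[]] else [])

-- loop body of B for one (file_path, embed_code) item; state = (combined, seen_functions)
def pvStep2B (st : PySem.Dict String String × PySem.Dict String (PySem.Set (List Char)))
    (p : String × String) : PySem.Dict String String × PySem.Dict String (PySem.Set (List Char)) :=
  let segs := pvSegmentsB p.2.toList
  let ef : PySem.Set (List Char) := PySem.Set.ofList (segs.map Prod.fst)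
  if st.1.contains p.1 = false then (st.1.insert p.1 p.2, st.2.insert p.1 ef)
  else
    let nf := PySem.Set.diff ef (st.2.getD p.1 PySem.Set.empty)
    let parts := pvPartsB nf segs
    if parts.isEmpty then st
    else
      (st.1.insert p.1 (String.ofList (PySem.Chars.rstrip (st.1.getD p.1 "").toList ++
         "\n\n".toList ++ PySem.Chars.join ['\n'] parts)),
       st.2.insert p.1 (PySem.Set.update (st.2.getD p.1 PySem.Set.empty) nf))

def combine_contexts_py_alt (ast_context : List (String × String)) (embedding_context : List (String × String)) : List (String × String) :=
  ((embedding_context.foldl pvStep2B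
      (PySem.Dict.ofList ast_context,
       ast_context.foldl
         (fun d p => d.insert p.1 (PySem.Set.ofList ((pvSegmentsB p.2.toList).map Prod.fst)))
         PySem.Dict.empty)).1).items

-- ===== PRECONDITION & SPEC =====
def Spec_combine_contexts_py (ast_context : List (String × String)) (embedding_context : List (String × String)) (out : List (String × String)) : Prop := out = combine_contexts_py_alt ast_context embedding_context
instance (ast_context : List (String × String)) (embedding_context : List (String × String)) (out : List (String × String)) : Decidable (Spec_combine_contexts_py ast_context embedding_context out) := by unfold Spec_combine_contexts_py; infer_instance

-- ===== CLAIM (what is proved, stated in full; the proofs are below) =====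
def Claim_equal_combine_contexts_py : Prop := ∀ (ast_context : List (String × String)) (embedding_context : List (String × String)), Dom_combine_contexts_py ast_context embedding_context → Spec_combine_contexts_py ast_context embedding_context (combine_contexts_py ast_context embedding_context)

-- ===== LEMMAS AND PROOFS =====

-- every result of splitOn.go carries at least acc.length + 1 pieces
lemma pvGoLenGe (fuel : Nat) : ∀ (l cur : List Char) (acc : List (List Char)),
    acc.length + 1 ≤ (PySem.Chars.splitOn.go [':'] fuel l cur acc).length := by
  induction fuel with
  | zero => intro l cur acc; simp [PySem.Chars.splitOn.go]
  | succ fuel ih =>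
    intro l cur acc
    cases l with
    | nil => simp [PySem.Chars.splitOn.go]
    | cons c rest =>
      by_cases h : [':'].isPrefixOf (c :: rest) = true
      · simp only [PySem.Chars.splitOn.go, h, if_pos]
        have := ih (List.drop [':'].length (c :: rest)) [] (cur.reverse :: acc)
        simp at this ⊢; omega
      · simp only [PySem.Chars.splitOn.go, h]
        simpa using ih rest (c :: cur) acc

-- a line containing ':' splits into at least two pieces
lemma pvGoColon (fuel : Nat) : ∀ (l cur : List Char) (acc : List (List Char)),
    l.length < fuel → (':') ∈ l →
    acc.length + 2 ≤ (PySem.Chars.splitOn.go [':'] fuel l cur acc).length := by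
  induction fuel with
  | zero => intro l cur acc h; omega
  | succ fuel ih =>
    intro l cur acc hlen hmem
    cases l with
    | nil => simp at hmem
    | cons c rest =>
      by_cases hc : c = ':'
      · subst hc
        have hpre : [':'].isPrefixOf (':' :: rest) = true := by simp [List.isPrefixOf]
        simp only [PySem.Chars.splitOn.go, hpre, if_pos]
        have := pvGoLenGe fuel (List.drop [':'].length (':' :: rest)) [] (cur.reverse :: acc)
        simp at this ⊢; omega
      · have hpre : [':'].isPrefixOf (c :: rest) = false := by
          simp [List.isPrefixOf]; exact fun h => absurd h.symm hc
        have hmem' : (':') ∈ rest := by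
          rcases List.mem_cons.mp hmem with h | h
          · exact absurd h.symm hc
          · exact h
        simp only [PySem.Chars.splitOn.go, hpre, Bool.false_eq_true, if_false]
        exact ih rest (c :: cur) acc (by simp at hlen ⊢; omega) hmem'

lemma pvColonSplit (line : List Char) (h : pvHdrA line = true) :
    2 ≤ (PySem.Chars.splitOn line [':']).length := by
  have hmem : (':') ∈ line := by
    simp only [pvHdrA, Bool.or_eq_true, PySem.Chars.startswith_iff] at h
    rcases h with (h | h) | h <;>
      exact h.subset (by decide)
  have := pvGoColon (line.length + 1) line [] [] (by omega) hmem
  simpa [PySem.Chars.splitOn] using this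

-- pvParseB is pvParseA applied to the line's ':'-split
lemma pvParse_eq (line : List Char) : pvParseA (PySem.Chars.splitOn line [':']) = pvParseB line := rfl

-- the segment list, as a structural recursion with an optional open segment
def pvBlocks : List (List Char) → Option (List Char × List (List Char)) → List (List Char × List (List Char))
  | [], none => []
  | [], some pr => [pr]
  | line :: rest, pend =>
    if pvHdrA line then pend.toList ++ pvBlocks rest (some (pvParseB line, [line]))
    else
      match pend with
      | none => pvBlocks rest none
      | some pr => pvBlocks rest (some (pr.1, pr.2 ++ [line]))

-- B's fold with a pending last segment computes pvBlocks
lemma pvSegFold_pend : ∀ (lines : List (List Char)) (done : List (List Char × List (List Char)))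
    (pr : List Char × List (List Char)),
    lines.foldl pvSegStepB (done ++ [pr]) = done ++ pvBlocks lines (some pr) := by
  intro lines
  induction lines with
  | nil => intro done pr; simp [pvBlocks]
  | cons line rest ih =>
    intro done pr
    by_cases hh : pvHdrB line = true
    · have hhA : pvHdrA line = true := hh
      simp only [List.foldl_cons, pvSegStepB, hh, if_pos, pvBlocks, hhA]
      simpa [List.append_assoc] using ih (done ++ [pr]) (pvParseB line, [line])
    · simp only [List.foldl_cons, pvSegStepB, hh, Bool.false_eq_true, if_false,
        List.getLast?_concat, List.dropLast_concat, pvBlocks]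
      have hhA : pvHdrA line = false := by simpa using hh
      rw [ih done (pr.1, pr.2 ++ [line])]
      simp [hhA]

lemma pvSegFold_none : ∀ (lines : List (List Char)),
    lines.foldl pvSegStepB [] = pvBlocks lines none := by
  intro lines
  induction lines with
  | nil => rfl
  | cons line rest ih =>
    by_cases hh : pvHdrB line = true
    · have hhA : pvHdrA line = true := hh
      simp only [List.foldl_cons, pvSegStepB, hh, if_pos, pvBlocks, hhA]
      simpa using pvSegFold_pend rest [] (pvParseB line, [line])
    · have hhA : pvHdrA line = false := by simpa using hh
      simp only [List.foldl_cons, pvSegStepB, hh, Bool.false_eq_true, if_false,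
        List.getLast?_eq_none_iff.mpr rfl, pvBlocks, hhA]
      simpa using ih

lemma pvSegmentsB_eq_blocks (code : List Char) :
    pvSegmentsB code = pvBlocks (PySem.Chars.splitOn code ['\n']) none :=
  pvSegFold_none _

-- the names of the header lines, in order
def pvHdrNames (lines : List (List Char)) : List (List Char) :=
  lines.filterMap (fun l => if pvHdrA l then some (pvParseB l) else none)

lemma pvExFold (lines : List (List Char)) : ∀ (s : PySem.Set (List Char)),
    lines.foldl pvExStepA s = PySem.Set.update s (pvHdrNames lines) := by
  induction lines with
  | nil => intro s; rfl
  | cons line rest ih =>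
    intro s
    by_cases hh : pvHdrA line = true
    · have h2 := pvColonSplit line hh
      simp only [List.foldl_cons, pvExStepA, hh, if_pos, h2, pvHdrNames, List.filterMap_cons,
        pvParse_eq]
      rw [ih]
      simp [PySem.Set.update, pvHdrNames]
    · simp only [List.foldl_cons, pvExStepA, hh, Bool.false_eq_true, if_false, pvHdrNames,
        List.filterMap_cons]
      rw [ih]
      simp [pvHdrNames]

lemma pvBlocks_names (lines : List (List Char)) :
    ∀ (pend : Option (List Char × List (List Char))),
    (pvBlocks lines pend).map Prod.fst = (pend.map Prod.fst).toList ++ pvHdrNames lines := by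
  induction lines with
  | nil => intro pend; cases pend <;> simp [pvBlocks, pvHdrNames]
  | cons line rest ih =>
    intro pend
    by_cases hh : pvHdrA line = true
    · simp only [pvBlocks, hh, if_pos, List.map_append, ih, pvHdrNames, List.filterMap_cons]
      cases pend <;> simp
    · simp only [pvBlocks, hh, Bool.false_eq_true, if_false, pvHdrNames, List.filterMap_cons]
      cases pend with
      | none => simpa [pvHdrNames] using ih none
      | some pr => simpa [hh, pvHdrNames] using ih (some (pr.1, pr.2 ++ [line]))

-- A's extracted name set is the set of B's segment names
lemma pvExtract_eq (code : List Char) :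
    pvExtractA code = PySem.Set.ofList ((pvSegmentsB code).map Prod.fst) := by
  rw [pvSegmentsB_eq_blocks, pvBlocks_names, pvExtractA, pvExFold]
  simp [PySem.Set.update, PySem.Set.ofList, PySem.Set.empty]

-- encode an optional open segment as A's (in_function, current_func_name, current_func_lines)
def pvEnc : Option (List Char × List (List Char)) → Bool × Option (List Char) × List (List Char)
  | none => (false, none, [])
  | some pr => (true, some pr.1, pr.2)

lemma pvFlush_enc (nf : PySem.Set (List Char)) (ncp : List (List Char))
    (pend : Option (List Char × List (List Char))) :
    pvFlush nf (ncp, pvEnc pend) = ncp ++ pvPartsB nf pend.toList := by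
  cases pend with
  | none => simp [pvFlush, pvEnc, pvPartsB, pvInNew]
  | some pr =>
    by_cases h : pr.1 ∈ nf <;>
      simp [pvFlush, pvEnc, pvPartsB, pvInNew, PySem.Set.contains, h]

-- A's scan equals the filtered flattening of the block list
lemma pvScanA (nf : PySem.Set (List Char)) : ∀ (lines : List (List Char))
    (ncp : List (List Char)) (pend : Option (List Char × List (List Char))),
    pvFlush nf (lines.foldl (pvStepA nf) (ncp, pvEnc pend)) =
      ncp ++ pvPartsB nf (pvBlocks lines pend) := by
  intro lines
  induction lines with
  | nil =>
    intro ncp pend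
    simp only [List.foldl_nil, pvFlush_enc]
    cases pend <;> simp [pvBlocks, pvPartsB]
  | cons line rest ih =>
    intro ncp pend
    by_cases hh : pvHdrA line = true
    · have h2 := pvColonSplit line hh
      have hstep : pvStepA nf (ncp, pvEnc pend) line =
          (pvFlush nf (ncp, pvEnc pend), pvEnc (some (pvParseB line, [line]))) := by
        simp [pvStepA, hh, h2, pvEnc, pvParse_eq]
      simp only [List.foldl_cons, hstep, ih, pvBlocks, hh, if_pos, pvFlush_enc]
      simp [pvPartsB, List.append_assoc]
    · cases pend with
      | none =>
        have hstep : pvStepA nf (ncp, pvEnc none) line = (ncp, pvEnc none) := by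
          simp [pvStepA, hh, pvEnc]
        simp only [List.foldl_cons, hstep, ih, pvBlocks, hh, Bool.false_eq_true, if_false]
      | some pr =>
        have hstep : pvStepA nf (ncp, pvEnc (some pr)) line =
            (ncp, pvEnc (some (pr.1, pr.2 ++ [line]))) := by
          simp [pvStepA, hh, pvEnc]
        simp only [List.foldl_cons, hstep, ih, pvBlocks, hh, Bool.false_eq_true, if_false]

lemma pvNewParts_eq (nf : PySem.Set (List Char)) (code : List Char) :
    pvNewPartsA nf code = pvPartsB nf (pvSegmentsB code) := by
  have := pvScanA nf (PySem.Chars.splitOn code ['\n']) [] none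
  simpa [pvNewPartsA, pvEnc, pvSegmentsB_eq_blocks] using this

lemma pvParts_nil (segs : List (List Char × List (List Char))) :
    pvPartsB ([] : PySem.Set (List Char)) segs = [] := by
  simp [pvPartsB, PySem.Set.contains]

-- the two per-item loop bodies agree
lemma pvStep2_eq (st : PySem.Dict String String × PySem.Dict String (PySem.Set (List Char)))
    (p : String × String) : pvStep2A st p = pvStep2B st p := by
  simp only [pvStep2A, pvStep2B, pvExtract_eq, pvNewParts_eq]
  by_cases hc : st.1.contains p.1 = false
  · simp [hc]
  · rw [if_neg hc, if_neg hc]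
    by_cases hnf : PySem.Set.diff (PySem.Set.ofList ((pvSegmentsB p.2.toList).map Prod.fst))
        (st.2.getD p.1 ([] : PySem.Set (List Char))) = []
    · simp [hnf, pvParts_nil]
    · simp [hnf]

-- ===== VERDICT (by name: the statement is the Claim_ definition above) =====
theorem combine_contexts_py_spec : Claim_equal_combine_contexts_py := by
  intro ast emb _
  unfold Spec_combine_contexts_py combine_contexts_py combine_contexts_py_alt
  have hstep : pvStep2A = pvStep2B := funext fun st => funext fun p => pvStep2_eq st p
  rw [hstep, PySem.List.foldl_prod_mk
    (f := fun (d : PySem.Dict String String) (p : String × String) => d.insert p.1 p.2)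
    (g := fun (d : PySem.Dict String (PySem.Set (List Char))) (p : String × String) =>
      d.insert p.1 (pvExtractA p.2.toList))]
  have h2 : ast.foldl
      (fun (d : PySem.Dict String (PySem.Set (List Char))) (p : String × String) =>
        d.insert p.1 (pvExtractA p.2.toList)) PySem.Dict.empty
      = ast.foldl
      (fun d p => d.insert p.1 (PySem.Set.ofList ((pvSegmentsB p.2.toList).map Prod.fst)))
      PySem.Dict.empty := by
    apply PySem.List.foldl_congr_mem
    intro acc p _
    rw [pvExtract_eq]
  rw [h2]
  rfl
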